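-- pv_equiv track=rewrite | github.com/jxylon/Search_Course_Exercises | ex1/ex1.py | match_num
-- ===== SOURCE A (Python) =====
-- def match_num(str):
--     prefix, posfix = [], []
--     for i in range(1, len(str)):
--         prefix.append(str[0:i])
--         posfix.append(str[i:len(str)])
--     list = [l for l in prefix if l in posfix]
--     if (len(list) == 0):
--         return 0
--     else:
--         list_first = list[0]
--         return len(list_first)
-- ===== SOURCE B (Python) =====
-- def match_num(str):
--     n = len(str)
--     for k in range(1, n):
--         if str[:k] == str[n - k:]:
--             return k
--     return 0
-- ===== Notes on version B (the rewrite author's own statement) =====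
-- stated objective: faster
-- what changed: Instead of materialising every proper prefix and every proper suffix into two lists and filtering prefixes by list membership, B scans border lengths k = 1..n-1 once and returns the first k whose length-k prefix equals the length-k suffix, with no intermediate lists and early exit.
import Mathlib
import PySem

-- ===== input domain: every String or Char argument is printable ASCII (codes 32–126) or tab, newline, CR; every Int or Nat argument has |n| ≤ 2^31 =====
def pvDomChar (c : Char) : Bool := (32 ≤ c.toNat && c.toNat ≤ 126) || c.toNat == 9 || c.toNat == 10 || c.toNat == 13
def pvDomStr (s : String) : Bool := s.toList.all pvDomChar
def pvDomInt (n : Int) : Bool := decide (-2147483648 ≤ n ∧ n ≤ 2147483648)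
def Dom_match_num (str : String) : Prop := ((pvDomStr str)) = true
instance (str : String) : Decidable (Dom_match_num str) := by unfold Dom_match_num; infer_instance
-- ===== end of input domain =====

-- B scans border lengths once with early exit instead of building prefix/suffix lists and
-- filtering by membership; equivalence of return values proved for all strings (A is total).

-- ===== PORT A =====
-- builds the list of proper prefixes and the list of proper suffixes, filters the prefixes
-- that occur in the suffix list, returns the length of the first one (0 if none)
def match_num (str : String) : Int :=
  let s := str.toList
  let pp := (PySem.List.pyRange 1 (PySem.Str.len str) 1).foldl
      (fun (pp : List (List Char) × List (List Char)) i =>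
        (pp.1 ++ [PySem.List.slice s (some 0) (some i)],
         pp.2 ++ [PySem.List.slice s (some i) (some (PySem.Str.len str))]))
      ([], [])
  let lst := pp.1.filter (fun l => pp.2.contains l)
  if lst.length = 0 then 0 else ((lst.headD []).length : Int)

-- ===== PORT B =====
-- the `for k in range(1, n)` loop of Source B with early return; str[:k] / str[n-k:] are
-- List.take k / List.drop (n-k) (exact for 1 ≤ k < n)
def pvBorderFrom (s : List Char) (k : Nat) : Int :=
  if _h : k < s.length then
    if s.take k = s.drop (s.length - k) then (k : Int)
    else pvBorderFrom s (k + 1)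
  else 0
termination_by s.length - k

def match_num_alt (str : String) : Int := pvBorderFrom str.toList 1

-- ===== PRECONDITION & SPEC =====
def Spec_match_num (str : String) (out : Int) : Prop := out = match_num_alt str
instance (str : String) (out : Int) : Decidable (Spec_match_num str out) := by unfold Spec_match_num; infer_instance

-- ===== CLAIM (what is proved, stated in full; the proofs are below) =====
def Claim_equal_match_num : Prop := ∀ (str : String), Dom_match_num str → Spec_match_num str (match_num str)

-- ===== LEMMAS AND PROOFS =====

-- the pair-building fold is two maps
theorem pvFoldPair (f g : Int → List Char) (l : List Int) (a b : List (List Char)) :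
    l.foldl (fun (pp : List (List Char) × List (List Char)) i =>
        (pp.1 ++ [f i], pp.2 ++ [g i])) (a, b) = (a ++ l.map f, b ++ l.map g) := by
  induction l generalizing a b with
  | nil => simp
  | cons x xs ih => simp [List.foldl_cons, ih]

-- membership of the k-th prefix in the suffix list is the border condition
theorem pvMemPos (s : List Char) (k : Nat) (hk : k < s.length - 1) :
    (s.take (k+1) ∈ (List.range' 0 (s.length - 1)).map (fun j => s.drop (j+1))) ↔
      s.take (k+1) = s.drop (s.length - (k+1)) := by
  constructor
  · rintro h
    simp only [List.mem_map, List.mem_range'_1] at h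
    obtain ⟨j, hj, hEq⟩ := h
    have hlen := congrArg List.length hEq
    simp [List.length_take, List.length_drop] at hlen
    have : j + 1 = s.length - (k+1) := by omega
    rw [← hEq, ← this]
  · intro h
    simp only [List.mem_map, List.mem_range'_1]
    exact ⟨s.length - (k+1) - 1, by omega, by rw [h]; congr 1; omega⟩

-- headLen of the filtered tail of the prefix list equals the B loop from k = j+1
theorem pvMain (s : List Char) (j : Nat) (hj : j ≤ s.length - 1) :
    (match ((List.range' j (s.length - 1 - j)).map (fun k => s.take (k+1))).filter
        (fun l => decide (l ∈ (List.range' 0 (s.length - 1)).map (fun i => s.drop (i+1)))) with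
      | [] => (0 : Int)
      | x :: _ => (x.length : Int)) = pvBorderFrom s (j + 1) := by
  generalize hc : s.length - 1 - j = c
  induction c generalizing j with
  | zero =>
    rw [pvBorderFrom]
    simp only [List.range'_zero, List.map_nil, List.filter_nil]
    rw [dif_neg (by omega)]
  | succ c ih =>
    have hjlt : j < s.length - 1 := by omega
    rw [List.range'_succ, List.map_cons, List.filter_cons]
    rw [pvBorderFrom, dif_pos (by omega)]
    by_cases hb : s.take (j+1) = s.drop (s.length - (j+1))
    · rw [if_pos ((decide_eq_true_iff).2 ((pvMemPos s j hjlt).2 hb))]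
      rw [if_pos hb]
      simp
      omega
    · rw [if_neg (by simpa using fun h => hb ((pvMemPos s j hjlt).1 h))]
      rw [if_neg hb]
      exact ih (j+1) (by omega) (by omega)

theorem pvHeadLen (l : List (List Char)) :
    (if l.length = 0 then (0 : Int) else ((l.headD []).length : Int)) =
      (match l with | [] => (0 : Int) | x :: _ => (x.length : Int)) := by
  cases l <;> simp

-- ===== VERDICT (by name: the statement is the Claim_ definition above) =====
theorem match_num_spec : Claim_equal_match_num := by
  intro str _
  unfold Spec_match_num match_num match_num_alt
  dsimp only
  set s := str.toList with hs
  have hlen : PySem.Str.len str = (s.length : Int) := by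
    simp [PySem.Str.len_eq, hs]
  rw [hlen, PySem.List.pyRange_one, pvFoldPair]
  simp only [List.nil_append]
  have hcast : ((s.length : Int) - 1).toNat = s.length - 1 := by omega
  rw [hcast]
  simp only [List.range_eq_range']
  -- rewrite the slices into take/drop
  have hpre : (List.range' 0 (s.length - 1)).map
      ((fun i => PySem.List.slice s (some 0) (some i)) ∘ (fun k : Nat => (1 : Int) + k))
      = (List.range' 0 (s.length - 1)).map (fun k => s.take (k+1)) := by
    apply List.map_congr_left
    intro k _
    have : (1 : Int) + (k : Int) = ((k + 1 : Nat) : Int) := by push_cast; ring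
    simp only [Function.comp, this]
    rw [PySem.List.slice_zero_start, PySem.List.slice_to_natCast]
  have hpos : (List.range' 0 (s.length - 1)).map
      ((fun i => PySem.List.slice s (some i) (some (s.length : Int))) ∘ (fun k : Nat => (1 : Int) + k))
      = (List.range' 0 (s.length - 1)).map (fun k => s.drop (k+1)) := by
    apply List.map_congr_left
    intro k hk
    have : (1 : Int) + (k : Int) = ((k + 1 : Nat) : Int) := by push_cast; ring
    simp only [Function.comp, this]
    rw [PySem.List.slice_natCast]
    exact List.take_of_length_le (by simp)
  rw [List.map_map, List.map_map, hpre, hpos]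
  have hcontains : (fun l => ((List.range' 0 (s.length - 1)).map (fun k => s.drop (k+1))).contains l)
      = (fun l => decide (l ∈ (List.range' 0 (s.length - 1)).map (fun i => s.drop (i+1)))) := by
    funext l
    simp
  rw [hcontains, pvHeadLen]
  have := pvMain s 0 (by omega)
  rw [Nat.sub_zero] at this
  exact this
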